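-- pv_equiv track=rewrite | github.com/kding-E/PPTD | Encoding/Instrumentation/ins_bytecode.py | _analyze_bytecode_instructions
-- ===== SOURCE A (Python) =====
-- def _analyze_bytecode_instructions(bytecode):
--     """
--     Analyze bytecode to distinguish between instructions and data
--
--     Returns:
--         dict: {position: opcode} mapping, containing only actual instruction positions
--     """
--     instruction_map = {}
--     i = 0
--
--     while i < len(bytecode):
--         opcode = bytecode[i]
--         instruction_map[i] = opcode
--
--         # Handle PUSH instructions (0x60-0x7f), skip subsequent data bytes
--         if 0x60 <= opcode <= 0x7f:
--             push_size = opcode - 0x5f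
--             i += push_size + 1  # Skip PUSH instruction and its data
--         else:
--             i += 1
--
--     return instruction_map
-- ===== SOURCE B (Python) =====
-- def _analyze_bytecode_instructions(bytecode):
--     instruction_map = {}
--     skip = 0
--     for i, opcode in enumerate(bytecode):
--         if skip:
--             skip -= 1
--             continue
--         instruction_map[i] = opcode
--         if 0x60 <= opcode <= 0x7f:
--             skip = opcode - 0x5f
--     return instruction_map
-- ===== Notes on version B (the rewrite author's own statement) =====
-- stated objective: alternative
-- what changed: Replaces the index-jumping while loop with a single for-loop over enumerate(bytecode) that maintains a skip-counter of PUSH data bytes still to consume.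
import Mathlib
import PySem

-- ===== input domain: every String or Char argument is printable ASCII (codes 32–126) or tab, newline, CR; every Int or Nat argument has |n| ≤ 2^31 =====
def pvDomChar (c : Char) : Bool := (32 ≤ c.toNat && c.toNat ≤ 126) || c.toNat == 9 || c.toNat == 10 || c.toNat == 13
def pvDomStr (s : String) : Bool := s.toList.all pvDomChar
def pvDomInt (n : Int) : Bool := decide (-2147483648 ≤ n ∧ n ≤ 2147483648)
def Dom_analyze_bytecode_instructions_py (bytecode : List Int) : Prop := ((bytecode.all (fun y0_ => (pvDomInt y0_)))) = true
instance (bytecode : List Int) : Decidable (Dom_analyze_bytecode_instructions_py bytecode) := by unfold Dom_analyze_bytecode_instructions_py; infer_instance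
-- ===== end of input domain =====

-- B replaces A's index-jumping while loop by one pass over every byte with a skip-counter (objective: alternative decomposition).

-- ===== PORT A =====
-- A's while loop: i jumps forward past PUSH data; keys are strictly increasing, so the dict is this list.
def pvGoA (bytecode : List Int) (i : Nat) : List (Int × Int) :=
  if h : i < bytecode.length then
    let opcode := bytecode[i]
    ((i : Int), opcode) ::
      (if 0x60 ≤ opcode ∧ opcode ≤ 0x7f then
        pvGoA bytecode (i + (opcode - 0x5f).toNat + 1)
      else
        pvGoA bytecode (i + 1))
  else []
termination_by bytecode.length - i
decreasing_by all_goals omega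

def analyze_bytecode_instructions_py (bytecode : List Int) : List (Int × Int) :=
  pvGoA bytecode 0

-- ===== PORT B =====
-- B's for-loop over enumerate(bytecode) with a skip counter.
def pvGoB : List Int → Nat → Nat → List (Int × Int)
  | [], _, _ => []
  | opcode :: rest, i, skip =>
    if skip > 0 then pvGoB rest (i + 1) (skip - 1)
    else ((i : Int), opcode) ::
      pvGoB rest (i + 1) (if 0x60 ≤ opcode ∧ opcode ≤ 0x7f then (opcode - 0x5f).toNat else 0)

def analyze_bytecode_instructions_py_alt (bytecode : List Int) : List (Int × Int) :=
  pvGoB bytecode 0 0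

-- ===== PRECONDITION & SPEC =====
def Spec_analyze_bytecode_instructions_py (bytecode : List Int) (out : List (Int × Int)) : Prop := out = analyze_bytecode_instructions_py_alt bytecode
instance (bytecode : List Int) (out : List (Int × Int)) : Decidable (Spec_analyze_bytecode_instructions_py bytecode out) := by unfold Spec_analyze_bytecode_instructions_py; infer_instance

-- ===== CLAIM (what is proved, stated in full; the proofs are below) =====
def Claim_equal_analyze_bytecode_instructions_py : Prop := ∀ (bytecode : List Int), Dom_analyze_bytecode_instructions_py bytecode → Spec_analyze_bytecode_instructions_py bytecode (analyze_bytecode_instructions_py bytecode)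

-- ===== LEMMAS AND PROOFS =====

-- A positive skip counter just drops `skip` bytes.
theorem pvGoB_skip (skip : Nat) : ∀ (l : List Int) (i : Nat),
    pvGoB l i skip = pvGoB (l.drop skip) (i + skip) 0 := by
  induction skip with
  | zero => intro l i; simp
  | succ s ih =>
    intro l i
    cases l with
    | nil => simp [pvGoB]
    | cons b rest =>
      rw [pvGoB]
      simp only [Nat.succ_sub_one, if_pos (Nat.succ_pos s)]
      rw [ih rest (i + 1)]
      simp [List.drop_succ_cons]
      ring_nf

theorem pvGoA_eq_pvGoB (bytecode : List Int) : ∀ (i : Nat),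
    pvGoA bytecode i = pvGoB (bytecode.drop i) i 0 := by
  intro i
  induction hn : bytecode.length - i using Nat.strong_induction_on generalizing i with
  | _ n ih =>
    subst hn
    rw [pvGoA]
    by_cases h : i < bytecode.length
    · rw [dif_pos h]; simp only []
      have hd : bytecode.drop i = bytecode[i] :: bytecode.drop (i + 1) :=
        List.drop_eq_getElem_cons h
      rw [hd, pvGoB]
      simp only [Nat.lt_irrefl]
      by_cases hp : 0x60 ≤ bytecode[i] ∧ bytecode[i] ≤ 0x7f
      · rw [if_pos hp, if_pos hp]
        rw [pvGoB_skip ((bytecode[i] - 0x5f).toNat) (bytecode.drop (i + 1)) (i + 1)]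
        rw [List.drop_drop]
        have heq : i + (bytecode[i] - 0x5f).toNat + 1
            = i + 1 + (bytecode[i] - 0x5f).toNat := by omega
        rw [heq, if_neg (by simp)]
        exact congrArg _ (ih _ (by omega) _ rfl)
      · rw [if_neg hp, if_neg hp]
        exact congrArg _ (ih _ (by omega) _ rfl)
    · rw [dif_neg h]
      rw [List.drop_eq_nil_of_le (by omega)]
      rfl

-- ===== VERDICT (by name: the statement is the Claim_ definition above) =====
theorem analyze_bytecode_instructions_py_spec : Claim_equal_analyze_bytecode_instructions_py := by
  intro bytecode _
  unfold Spec_analyze_bytecode_instructions_py analyze_bytecode_instructions_py analyze_bytecode_instructions_py_alt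
  simpa using pvGoA_eq_pvGoB bytecode 0
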